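-- pv_equiv track=rewrite | github.com/HQK1037/python | hello.py | canReachBFS
-- ===== SOURCE A (Python) =====
-- from typing import List
-- from collections import deque
--
-- def canReachBFS(arr: List[int], start: int) -> bool:
--     if arr[start] == 0:
--         return True
--
--     n = len(arr)
--     used = {start}
--     q = deque([start])
--
--     while len(q) > 0:
--         u = q.popleft()
--         for v in [u + arr[u], u - arr[u]]:
--             if 0 <= v < n and v not in used:
--                 if arr[v] == 0:
--                     return True
--                 q.append(v)
--                 used.add(v)
--
--     return False
-- ===== SOURCE B (Python) =====
-- def canReachBFS(arr, start):
--     n = len(arr)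
--     if arr[start] == 0:
--         return True
--     # predecessor lists of the jump graph (edges u -> u +/- arr[u] that land in range)
--     preds = [[] for _ in range(n)]
--     for u in range(n):
--         for v in (u + arr[u], u - arr[u]):
--             if 0 <= v < n:
--                 preds[v].append(u)
--     # multi-source traversal over REVERSED edges from the zero cells:
--     # good[i] == True  <=>  index i can reach some zero cell
--     good = [x == 0 for x in arr]
--     stack = [i for i in range(n) if arr[i] == 0]
--     while stack:
--         v = stack.pop()
--         for u in preds[v]:
--             if not good[u]:
--                 good[u] = True
--                 stack.append(u)
--     s = arr[start]
--     return any(0 <= v < n and good[v] for v in (start + s, start - s))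
-- ===== Notes on version B (the rewrite author's own statement) =====
-- stated objective: alternative
-- what changed: Replaces the forward BFS with a deque and visited set by a reverse multi-source traversal: B precomputes predecessor lists of the jump graph, propagates 'can reach a zero cell' backwards from all zero cells with a worklist, and then reads the answer off start's two outgoing edges.
import Mathlib
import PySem

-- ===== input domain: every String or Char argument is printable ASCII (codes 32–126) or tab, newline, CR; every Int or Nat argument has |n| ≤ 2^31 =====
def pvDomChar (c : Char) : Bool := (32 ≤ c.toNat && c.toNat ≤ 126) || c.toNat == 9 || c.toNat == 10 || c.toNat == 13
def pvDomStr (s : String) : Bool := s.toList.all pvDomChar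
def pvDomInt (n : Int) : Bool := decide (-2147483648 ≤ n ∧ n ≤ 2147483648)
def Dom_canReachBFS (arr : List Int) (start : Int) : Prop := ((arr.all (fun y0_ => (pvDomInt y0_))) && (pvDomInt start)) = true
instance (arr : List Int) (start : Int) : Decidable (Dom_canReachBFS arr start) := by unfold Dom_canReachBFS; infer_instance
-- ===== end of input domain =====

-- B replaces A's forward BFS from `start` by a reverse multi-source traversal: it precomputes
-- predecessor lists of the jump graph and propagates "can reach a zero cell" backwards from the
-- zero cells, then reads the answer off start's two outgoing edges (objective: alternative
-- algorithm of the same linear cost).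

-- ===== PORT A =====
-- arr[i] (Python index semantics, including negative indices); every use is guarded to the in-range case
def pvItem (arr : List Int) (i : Int) : Int := PySem.List.pyGetD arr i 0

-- one step of A's inner `for v in [...]` loop: `none` encodes A's `return True`
def bfsNeigh (arr : List Int) (st : List Int × PySem.Set Int) (v : Int) :
    Option (List Int × PySem.Set Int) :=
  if 0 ≤ v ∧ v < (arr.length : Int) ∧ ¬ v ∈ st.2 then
    if pvItem arr v = 0 then none
    else some (st.1 ++ [v], PySem.Set.add st.2 v)
  else some st

-- A's `while len(q) > 0` loop; the fuel only makes the recursion structural (shown sufficient below)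
def bfsLoop (arr : List Int) : Nat → List Int → PySem.Set Int → Bool
  | 0, _, _ => false
  | _ + 1, [], _ => false
  | fuel + 1, u :: qrest, used =>
    match bfsNeigh arr (qrest, used) (u + pvItem arr u) with
    | none => true
    | some st1 =>
      match bfsNeigh arr st1 (u - pvItem arr u) with
      | none => true
      | some st2 => bfsLoop arr fuel st2.1 st2.2

def canReachBFS (arr : List Int) (start : Int) : Bool :=
  if pvItem arr start = 0 then true
  else bfsLoop arr (2 * arr.length + 4) [start] (PySem.Set.ofList [start])

-- ===== PORT B =====
-- `if 0 <= v < n: preds[v].append(u)`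
def pvPredStep (n : Nat) (ps : List (List Int)) (u v : Int) : List (List Int) :=
  if 0 ≤ v ∧ v < (n : Int) then ps.set v.toNat (ps.getD v.toNat [] ++ [u]) else ps

-- B's predecessor-list construction loop `for u in range(n): for v in (u + arr[u], u - arr[u]): ...`
def pvBuildPreds (arr : List Int) : List (List Int) :=
  (List.range arr.length).foldl
    (fun (ps : List (List Int)) (u : Nat) =>
      pvPredStep arr.length
        (pvPredStep arr.length ps (u : Int) ((u : Int) + pvItem arr (u : Int)))
        (u : Int) ((u : Int) - pvItem arr (u : Int)))
    (List.replicate arr.length [])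

-- `good[v]` (every read is guarded to an in-range v)
def pvGood (good : List Bool) (v : Int) : Bool := good.getD v.toNat false

-- B's `while stack:` worklist loop; the fuel only makes the recursion structural (shown sufficient below)
def pvWlLoop (preds : List (List Int)) : Nat → List Int → List Bool → List Bool
  | 0, _, good => good
  | fuel + 1, stack, good =>
    match stack.getLast? with
    | none => good
    | some v =>
      let st := (preds.getD v.toNat []).foldl
        (fun (sg : List Int × List Bool) u =>
          if pvGood sg.2 u = false then (sg.1 ++ [u], sg.2.set u.toNat true) else sg)
        (stack.dropLast, good)
      pvWlLoop preds fuel st.1 st.2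

def canReachBFS_alt (arr : List Int) (start : Int) : Bool :=
  if pvItem arr start = 0 then true
  else
    let preds := pvBuildPreds arr
    let good0 := arr.map (fun x => decide (x = 0))
    let stack0 := ((List.range arr.length).filter
        (fun (i : Nat) => decide (pvItem arr (i : Int) = 0))).map Int.ofNat
    let good := pvWlLoop preds (3 * arr.length + 1) stack0 good0
    let s := pvItem arr start
    (decide (0 ≤ start + s) && decide (start + s < (arr.length : Int)) && pvGood good (start + s)) ||
    (decide (0 ≤ start - s) && decide (start - s < (arr.length : Int)) && pvGood good (start - s))

-- ===== PRECONDITION & SPEC =====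
-- Pre_ excludes exactly the inputs on which Python A raises IndexError on `arr[start]`
def Pre_canReachBFS (arr : List Int) (start : Int) : Prop :=
  PySem.Raise.InRange arr.length start
instance (arr : List Int) (start : Int) : Decidable (Pre_canReachBFS arr start) := by
  unfold Pre_canReachBFS; infer_instance

def pvWitness_canReachBFS : List Int × Int := ([1, 0], 0)

def Spec_canReachBFS (arr : List Int) (start : Int) (out : Bool) : Prop := out = canReachBFS_alt arr start
instance (arr : List Int) (start : Int) (out : Bool) : Decidable (Spec_canReachBFS arr start out) := by unfold Spec_canReachBFS; infer_instance

-- ===== CLAIM (what is proved, stated in full; the proofs are below) =====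
def Claim_equal_canReachBFS : Prop := ∀ (arr : List Int) (start : Int), Dom_canReachBFS arr start → Pre_canReachBFS arr start → Spec_canReachBFS arr start (canReachBFS arr start)

-- ===== LEMMAS AND PROOFS =====

-- the jump graph: an edge u → v when v = u ± arr[u] lands inside the array
def pvInb (n : Nat) (v : Int) : Prop := 0 ≤ v ∧ v < (n : Int)

def pvE (arr : List Int) (u v : Int) : Prop :=
  pvInb arr.length v ∧ (v = u + pvItem arr u ∨ v = u - pvItem arr u)

-- "a zero-valued index is reachable from u" — the common characterization of both programs
def pvRZ (arr : List Int) (u : Int) : Prop :=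
  ∃ w, Relation.ReflTransGen (pvE arr) u w ∧ pvItem arr w = 0

lemma pv_closed_no_zero (arr : List Int) (S : List Int)
    (hcl : ∀ x ∈ S, ∀ v, pvE arr x v → v ∈ S)
    (hnz : ∀ x ∈ S, pvItem arr x ≠ 0) :
    ∀ u ∈ S, ¬ pvRZ arr u := by
  rintro u hu ⟨w, hr, hw⟩
  have key : ∀ y, Relation.ReflTransGen (pvE arr) u y → y ∈ S := by
    intro y hy
    induction hy with
    | refl => exact hu
    | tail _ h2 ih => exact hcl _ ih _ h2
  exact hnz w (key w hr) hw

lemma pv_used_len (arr : List Int) (start : Int) (used : List Int) (hnd : used.Nodup)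
    (hdom : ∀ x ∈ used, x = start ∨ pvInb arr.length x) :
    used.length ≤ arr.length + 1 := by
  have hsub : used ⊆ start :: (List.range arr.length).map Int.ofNat := by
    intro x hx
    rcases hdom x hx with h | ⟨h0, h1⟩
    · simp [h]
    · simp only [List.mem_cons, List.mem_map, List.mem_range]
      right
      exact ⟨x.toNat, by omega, Int.toNat_of_nonneg h0⟩
  have := (hnd.subperm hsub).length_le
  simpa using this

lemma bfsNeigh_none_iff (arr : List Int) (q used : List Int) (v : Int) :
    bfsNeigh arr (q, used) v = none ↔
      (pvInb arr.length v ∧ ¬ v ∈ used ∧ pvItem arr v = 0) := by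
  unfold bfsNeigh pvInb
  split
  · split <;> simp_all
  · simp_all

lemma bfsNeigh_some_spec (arr : List Int) (q used : List Int) (v : Int)
    (st' : List Int × PySem.Set Int) (h : bfsNeigh arr (q, used) v = some st') :
    (st' = (q, used) ∧ (¬ pvInb arr.length v ∨ v ∈ used)) ∨
    (st' = (q ++ [v], used ++ [v]) ∧ pvInb arr.length v ∧ ¬ v ∈ used ∧ pvItem arr v ≠ 0) := by
  unfold bfsNeigh at h
  split at h
  · rename_i hc
    split at h
    · cases h
    · right
      obtain rfl := (Option.some.inj h).symm
      refine ⟨?_, ⟨hc.1, hc.2.1⟩, hc.2.2, by assumption⟩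
      simp [PySem.Set.add_of_not_mem hc.2.2]
  · left
    obtain rfl := (Option.some.inj h).symm
    rename_i hc
    unfold pvInb
    exact ⟨rfl, by tauto⟩

lemma pv_neigh_step (arr : List Int) (start : Int) (q used q' used' : List Int) (u v : Int)
    (hnd : used.Nodup) (hstart : start ∈ used) (hq : ∀ x ∈ q, x ∈ used)
    (hdom : ∀ x ∈ used, x = start ∨ pvInb arr.length x)
    (hnz : ∀ x ∈ used, pvItem arr x ≠ 0)
    (hreach : ∀ x ∈ used, Relation.ReflTransGen (pvE arr) start x)
    (hru : Relation.ReflTransGen (pvE arr) start u)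
    (hEv : pvInb arr.length v → pvE arr u v)
    (h : bfsNeigh arr (q, used) v = some (q', used')) :
    used'.Nodup ∧ start ∈ used' ∧ (∀ x ∈ q', x ∈ used') ∧
    (∀ x ∈ used', x = start ∨ pvInb arr.length x) ∧
    (∀ x ∈ used', pvItem arr x ≠ 0) ∧
    (∀ x ∈ used', Relation.ReflTransGen (pvE arr) start x) ∧
    (∀ x ∈ used, x ∈ used') ∧
    (pvInb arr.length v → v ∈ used') ∧
    ((q' = q ∧ used' = used) ∨ (q' = q ++ [v] ∧ used' = used ++ [v] ∧ ¬ v ∈ used)) := by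
  rcases bfsNeigh_some_spec arr q used v _ h with ⟨heq, hcase⟩ | ⟨heq, hinb, hnin, hnz'⟩
  · obtain ⟨hq', hu'⟩ := Prod.ext_iff.mp heq
    simp only at hq' hu'
    subst hq'; subst hu'
    refine ⟨hnd, hstart, hq, hdom, hnz, hreach, fun x hx => hx, ?_, Or.inl ⟨rfl, rfl⟩⟩
    intro hvinb
    rcases hcase with h | h
    · exact absurd hvinb h
    · exact h
  · obtain ⟨hq', hu'⟩ := Prod.ext_iff.mp heq
    simp only at hq' hu'
    subst hq'; subst hu'
    have hvE : pvE arr u v := hEv hinb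
    refine ⟨?_, List.mem_append_left _ hstart, ?_, ?_, ?_, ?_,
      fun x hx => List.mem_append_left _ hx, fun _ => List.mem_append_right _ (by simp), Or.inr ⟨rfl, rfl, hnin⟩⟩
    · exact hnd.append (List.nodup_singleton v)
        (by intro a ha hav; simp only [List.mem_singleton] at hav; exact hnin (hav ▸ ha))
    · intro x hx
      rcases List.mem_append.mp hx with hx | hx
      · exact List.mem_append_left _ (hq x hx)
      · exact List.mem_append_right _ hx
    · intro x hx
      rcases List.mem_append.mp hx with hx | hx
      · exact hdom x hx
      · right; simp at hx; subst hx; exact hinb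
    · intro x hx
      rcases List.mem_append.mp hx with hx | hx
      · exact hnz x hx
      · simp at hx; subst hx; exact hnz'
    · intro x hx
      rcases List.mem_append.mp hx with hx | hx
      · exact hreach x hx
      · simp at hx; subst hx; exact hru.tail hvE

lemma pv_bfsLoop_iff (arr : List Int) (start : Int) :
    ∀ (fuel : Nat) (q used : List Int),
    used.Nodup →
    start ∈ used →
    (∀ x ∈ q, x ∈ used) →
    (∀ x ∈ used, x = start ∨ pvInb arr.length x) →
    (∀ x ∈ used, pvItem arr x ≠ 0) →
    (∀ x ∈ used, Relation.ReflTransGen (pvE arr) start x) →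
    (∀ x ∈ used, x ∈ q ∨ ∀ v, pvE arr x v → v ∈ used) →
    q.length + 2 * (arr.length + 1 - used.length) < fuel →
    (bfsLoop arr fuel q used = true ↔ pvRZ arr start) := by
  intro fuel
  induction fuel with
  | zero => intro q used _ _ _ _ _ _ _ hm; omega
  | succ fuel ih =>
    intro q used hnd hstart hq hdom hnz hreach hcl hm
    cases q with
    | nil =>
      simp only [bfsLoop, Bool.false_eq_true, false_iff]
      refine pv_closed_no_zero arr used ?_ hnz start hstart
      intro x hx v hEv
      rcases hcl x hx with h | h
      · cases h
      · exact h v hEv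
    | cons u qrest =>
      have huu : u ∈ used := hq u (List.mem_cons_self ..)
      have hru := hreach u huu
      simp only [bfsLoop]
      cases h1 : bfsNeigh arr (qrest, used) (u + pvItem arr u) with
      | none =>
        obtain ⟨hinb, hnin, hz⟩ := (bfsNeigh_none_iff arr qrest used _).mp h1
        simp only [true_iff]
        exact ⟨u + pvItem arr u, hru.tail ⟨hinb, Or.inl rfl⟩, hz⟩
      | some st1 =>
        obtain ⟨q1, used1⟩ := st1
        obtain ⟨d1, d2, d3, d4, d5, d6, d7, d8, d9⟩ :=
          pv_neigh_step arr start qrest used q1 used1 u (u + pvItem arr u) hnd hstart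
            (fun x hx => hq x (List.mem_cons_of_mem _ hx)) hdom hnz hreach hru
            (fun hinb => ⟨hinb, Or.inl rfl⟩) h1
        show (match bfsNeigh arr (q1, used1) (u - pvItem arr u) with
          | none => true
          | some st2 => bfsLoop arr fuel st2.1 st2.2) = true ↔ pvRZ arr start
        cases h2 : bfsNeigh arr (q1, used1) (u - pvItem arr u) with
        | none =>
          obtain ⟨hinb, hnin, hz⟩ := (bfsNeigh_none_iff arr q1 used1 _).mp h2
          simp only [true_iff]
          exact ⟨u - pvItem arr u, hru.tail ⟨hinb, Or.inr rfl⟩, hz⟩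
        | some st2 =>
          obtain ⟨q2, used2⟩ := st2
          show bfsLoop arr fuel q2 used2 = true ↔ pvRZ arr start
          obtain ⟨e1, e2, e3, e4, e5, e6, e7, e8, e9⟩ :=
            pv_neigh_step arr start q1 used1 q2 used2 u (u - pvItem arr u) d1 d2 d3 d4 d5 d6 hru
              (fun hinb => ⟨hinb, Or.inr rfl⟩) h2
          have hq1sub : ∀ y ∈ qrest, y ∈ q1 := by
            rcases d9 with ⟨rfl, -⟩ | ⟨rfl, -, -⟩
            · exact fun y hy => hy
            · exact fun y hy => List.mem_append_left _ hy
          have hq2sub : ∀ y ∈ q1, y ∈ q2 := by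
            rcases e9 with ⟨rfl, -⟩ | ⟨rfl, -, -⟩
            · exact fun y hy => hy
            · exact fun y hy => List.mem_append_left _ hy
          apply ih q2 used2 e1 e2 e3 e4 e5 e6
          · intro x hx
            by_cases hxu : x ∈ used
            · rcases hcl x hxu with hmem | hclosed
              · rcases List.mem_cons.mp hmem with rfl | hmem
                · right
                  intro v hEv
                  rcases hEv.2 with hv | hv
                  · subst hv; exact e7 _ (d8 hEv.1)
                  · subst hv; exact e8 hEv.1
                · exact Or.inl (hq2sub _ (hq1sub _ hmem))
              · right
                intro v hEv
                exact e7 _ (d7 _ (hclosed v hEv))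
            · by_cases hxu1 : x ∈ used1
              · -- x added by the first candidate
                rcases d9 with ⟨-, rfl⟩ | ⟨hq1e, hu1e, -⟩
                · exact absurd hxu1 hxu
                · have hx1 : x = u + pvItem arr u := by
                    rw [hu1e] at hxu1
                    rcases List.mem_append.mp hxu1 with h | h
                    · exact absurd h hxu
                    · simpa using h
                  left
                  apply hq2sub
                  rw [hq1e, hx1]
                  simp
              · -- x added by the second candidate
                rcases e9 with ⟨-, rfl⟩ | ⟨hq2e, hu2e, -⟩
                · exact absurd hx hxu1
                · have hx2 : x = u - pvItem arr u := by
                    rw [hu2e] at hx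
                    rcases List.mem_append.mp hx with h | h
                    · exact absurd h hxu1
                    · simpa using h
                  left
                  rw [hq2e, hx2]
                  simp
          · have hbound : used2.length ≤ arr.length + 1 := pv_used_len arr start used2 e1 e4
            have hm' : qrest.length + 1 + 2 * (arr.length + 1 - used.length) < fuel + 1 := by
              simpa using hm
            rcases d9 with ⟨hqe, hue⟩ | ⟨hqe, hue, -⟩ <;> rcases e9 with ⟨hqe2, hue2⟩ | ⟨hqe2, hue2, -⟩ <;>
              subst hqe <;> subst hue <;> subst hqe2 <;> subst hue2 <;>
              simp only [List.length_append, List.length_singleton] at hbound hm' ⊢ <;> omega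

lemma pv_A_iff (arr : List Int) (start : Int) :
    (canReachBFS arr start = true ↔ pvRZ arr start) := by
  unfold canReachBFS
  by_cases h0 : pvItem arr start = 0
  · rw [if_pos h0]
    simp only [true_iff]
    exact ⟨start, Relation.ReflTransGen.refl, h0⟩
  · rw [if_neg h0]
    have hof : PySem.Set.ofList [start] = [start] := rfl
    rw [hof]
    apply pv_bfsLoop_iff arr start (2 * arr.length + 4) [start] [start]
    · exact List.nodup_singleton start
    · simp
    · intro x hx; exact hx
    · intro x hx; left; simpa using hx
    · intro x hx; simp at hx; subst hx; exact h0
    · intro x hx; simp at hx; subst hx; exact Relation.ReflTransGen.refl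
    · intro x hx; left; exact hx
    · simp; omega

lemma pv_predStep_mem (n : Nat) (ps : List (List Int)) (u v : Int) (w : Nat) (x : Int)
    (hw : w < ps.length) (hn : ps.length = n) :
    x ∈ (pvPredStep n ps u v).getD w [] ↔
      x ∈ ps.getD w [] ∨ (v = (w : Int) ∧ x = u) := by
  unfold pvPredStep
  split
  · rename_i hv
    by_cases h : v.toNat = w
    · have hvw : v = (w : Int) := by omega
      simp [List.getD, List.getElem?_set_self (by omega : w < ps.length), hvw]
    · have : v ≠ (w : Int) := by omega
      simp [List.getD, List.getElem?_set_ne (by omega : v.toNat ≠ w), this]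
  · rename_i hv
    have : ¬ (v = (w : Int)) := by
      intro h; exact hv ⟨by omega, by omega⟩
    simp [this]

lemma pv_foldPreds_mem (arr : List Int) (l : List Nat) :
    ∀ (ps : List (List Int)), ps.length = arr.length →
    ∀ (w : Nat), w < arr.length → ∀ x : Int,
    (x ∈ (l.foldl (fun (ps : List (List Int)) (u : Nat) =>
      pvPredStep arr.length
        (pvPredStep arr.length ps (u : Int) ((u : Int) + pvItem arr (u : Int)))
        (u : Int) ((u : Int) - pvItem arr (u : Int))) ps).getD w [] ↔
      x ∈ ps.getD w [] ∨ ∃ u ∈ l, x = (u : Int) ∧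
        ((u : Int) + pvItem arr (u : Int) = (w : Int) ∨ (u : Int) - pvItem arr (u : Int) = (w : Int))) := by
  induction l with
  | nil => intro ps _ w _ x; simp
  | cons a t ih =>
    intro ps hlen w hw x
    rw [List.foldl_cons]
    have hlen1 : (pvPredStep arr.length ps (a : Int) ((a : Int) + pvItem arr (a : Int))).length = ps.length := by
      unfold pvPredStep; split <;> simp
    have hlen2 : (pvPredStep arr.length (pvPredStep arr.length ps (a : Int) ((a : Int) + pvItem arr (a : Int))) (a : Int) ((a : Int) - pvItem arr (a : Int))).length = ps.length := by
      rw [← hlen1]; unfold pvPredStep; split <;> simp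
    rw [ih _ (by omega) w hw x]
    rw [pv_predStep_mem _ _ _ _ _ _ (by omega) (by omega)]
    rw [pv_predStep_mem _ _ _ _ _ _ (by omega) (by omega)]
    simp only [List.mem_cons]
    constructor
    · rintro ((((h | ⟨h1, h2⟩) | ⟨h1, h2⟩)) | ⟨u, hu, h1, h2⟩)
      · exact Or.inl h
      · exact Or.inr ⟨a, Or.inl rfl, h2, Or.inl h1⟩
      · exact Or.inr ⟨a, Or.inl rfl, h2, Or.inr h1⟩
      · exact Or.inr ⟨u, Or.inr hu, h1, h2⟩
    · rintro (h | ⟨u, (rfl | hu), h1, (h2 | h2)⟩)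
      · exact Or.inl (Or.inl (Or.inl h))
      · exact Or.inl (Or.inl (Or.inr ⟨h2, h1⟩))
      · exact Or.inl (Or.inr ⟨h2, h1⟩)
      · exact Or.inr ⟨u, hu, h1, Or.inl h2⟩
      · exact Or.inr ⟨u, hu, h1, Or.inr h2⟩

lemma pv_mem_preds (arr : List Int) (w : Nat) (hw : w < arr.length) (x : Int) :
    x ∈ (pvBuildPreds arr).getD w [] ↔
      (0 ≤ x ∧ x < (arr.length : Int) ∧ pvE arr x (w : Int)) := by
  unfold pvBuildPreds
  rw [pv_foldPreds_mem arr _ _ (by simp) w hw x]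
  simp only [List.mem_range]
  constructor
  · rintro (h | ⟨u, hu, rfl, h2⟩)
    · simp [List.getD] at h
    · refine ⟨by omega, by omega, ⟨⟨by omega, by omega⟩, ?_⟩⟩
      rcases h2 with h2 | h2
      · exact Or.inl (by omega)
      · exact Or.inr (by omega)
  · rintro ⟨h0, h1, ⟨hinb, hshape⟩⟩
    right
    refine ⟨x.toNat, by omega, (Int.toNat_of_nonneg h0).symm, ?_⟩
    rcases hshape with h | h
    · left; rw [Int.toNat_of_nonneg h0]; omega
    · right; rw [Int.toNat_of_nonneg h0]; omega

lemma pvGood_set (good : List Bool) (i : Nat) (v : Int) (hi : i < good.length) :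
    pvGood (good.set i true) v = (pvGood good v || decide (v.toNat = i)) := by
  unfold pvGood
  by_cases h : v.toNat = i
  · subst h
    simp [List.getD, hi]
  · simp [List.getD, List.getElem?_set_ne (by omega : i ≠ v.toNat), h]

lemma pvGood_eq_getElem (good : List Bool) (v : Int) (h : v.toNat < good.length) :
    pvGood good v = good[v.toNat] := by
  simp [pvGood, List.getD, List.getElem?_eq_getElem h]

lemma pvItem_eq_getElem (arr : List Int) (i : Int) (h0 : 0 ≤ i) (h1 : i < (arr.length : Int)) :
    pvItem arr i = arr[i.toNat]'(by omega) := by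
  exact PySem.List.pyGetD_eq_getElem arr 0 h0 h1

lemma pvGood_good0 (arr : List Int) (i : Int) (h0 : 0 ≤ i) (h1 : i < (arr.length : Int)) :
    pvGood (arr.map (fun x => decide (x = 0))) i = decide (pvItem arr i = 0) := by
  have ht : i.toNat < arr.length := by omega
  rw [pvGood_eq_getElem _ _ (by simpa using ht)]
  rw [pvItem_eq_getElem arr i h0 h1]
  simp

lemma pv_innerFold (arr : List Int) :
    ∀ (l : List Int), (∀ u ∈ l, 0 ≤ u ∧ u < (arr.length : Int)) →
    ∀ (st : List Int) (good : List Bool), good.length = arr.length →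
    ((l.foldl (fun (sg : List Int × List Bool) u =>
        if pvGood sg.2 u = false then (sg.1 ++ [u], sg.2.set u.toNat true) else sg)
        (st, good)).2.length = arr.length) ∧
    (∀ x ∈ st, x ∈ (l.foldl (fun (sg : List Int × List Bool) u =>
        if pvGood sg.2 u = false then (sg.1 ++ [u], sg.2.set u.toNat true) else sg) (st, good)).1) ∧
    (∀ x ∈ (l.foldl (fun (sg : List Int × List Bool) u =>
        if pvGood sg.2 u = false then (sg.1 ++ [u], sg.2.set u.toNat true) else sg) (st, good)).1,
        x ∈ st ∨ x ∈ l) ∧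
    (∀ v : Int, pvGood good v = true → pvGood (l.foldl (fun (sg : List Int × List Bool) u =>
        if pvGood sg.2 u = false then (sg.1 ++ [u], sg.2.set u.toNat true) else sg) (st, good)).2 v = true) ∧
    (∀ u ∈ l, pvGood (l.foldl (fun (sg : List Int × List Bool) u =>
        if pvGood sg.2 u = false then (sg.1 ++ [u], sg.2.set u.toNat true) else sg) (st, good)).2 u = true) ∧
    (∀ v : Int, pvInb arr.length v → pvGood (l.foldl (fun (sg : List Int × List Bool) u =>
        if pvGood sg.2 u = false then (sg.1 ++ [u], sg.2.set u.toNat true) else sg) (st, good)).2 v = true →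
        pvGood good v = true ∨ v ∈ l) ∧
    (∀ v : Int, pvInb arr.length v → pvGood good v = false → pvGood (l.foldl (fun (sg : List Int × List Bool) u =>
        if pvGood sg.2 u = false then (sg.1 ++ [u], sg.2.set u.toNat true) else sg) (st, good)).2 v = true →
        v ∈ (l.foldl (fun (sg : List Int × List Bool) u =>
        if pvGood sg.2 u = false then (sg.1 ++ [u], sg.2.set u.toNat true) else sg) (st, good)).1) ∧
    ((l.foldl (fun (sg : List Int × List Bool) u =>
        if pvGood sg.2 u = false then (sg.1 ++ [u], sg.2.set u.toNat true) else sg) (st, good)).1.length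
      + 2 * (l.foldl (fun (sg : List Int × List Bool) u =>
        if pvGood sg.2 u = false then (sg.1 ++ [u], sg.2.set u.toNat true) else sg) (st, good)).2.count false
      ≤ st.length + 2 * good.count false) := by
  intro l
  induction l with
  | nil =>
    intro _ st good hg
    refine ⟨hg, fun x hx => hx, fun x hx => Or.inl hx, fun v hv => hv, by simp,
      fun v _ hv => Or.inl hv, ?_, le_refl _⟩
    intro v _ h1 h2
    simp only [List.foldl_nil] at h2
    rw [h1] at h2
    cases h2
  | cons a t ih =>
    intro hl st good hg
    have ha := hl a (List.mem_cons_self ..)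
    have hat : a.toNat < good.length := by omega
    rw [List.foldl_cons]
    by_cases hga : pvGood good a = false
    · rw [if_pos hga]
      have hg1 : (good.set a.toNat true).length = arr.length := by simp [hg]
      obtain ⟨c1, c2, c3, c4, c5, c6, c7, c8⟩ := ih (fun u hu => hl u (List.mem_cons_of_mem _ hu)) (st ++ [a]) (good.set a.toNat true) hg1
      have hset : ∀ v : Int, pvGood (good.set a.toNat true) v = (pvGood good v || decide (v.toNat = a.toNat)) :=
        fun v => pvGood_set good a.toNat v hat
      refine ⟨c1, ?_, ?_, ?_, ?_, ?_, ?_, ?_⟩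
      · intro x hx; exact c2 x (List.mem_append_left _ hx)
      · intro x hx
        rcases c3 x hx with h | h
        · rcases List.mem_append.mp h with h | h
          · exact Or.inl h
          · simp at h; exact Or.inr (by simp [h])
        · exact Or.inr (List.mem_cons_of_mem _ h)
      · intro v hv
        exact c4 v (by rw [hset]; simp [hv])
      · intro u hu
        rcases List.mem_cons.mp hu with rfl | hu
        · exact c4 u (by rw [hset]; simp)
        · exact c5 u hu
      · intro v hvin hv
        obtain ⟨hv0, hv1⟩ := hvin
        rcases c6 v ⟨hv0, hv1⟩ hv with h | h
        · rw [hset] at h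
          rcases Bool.or_eq_true_iff.mp h with h | h
          · exact Or.inl h
          · have : v = a := by
              have := of_decide_eq_true h
              omega
            exact Or.inr (by simp [this])
        · exact Or.inr (List.mem_cons_of_mem _ h)
      · intro v hvin hvf hvt
        obtain ⟨hv0, hv1⟩ := hvin
        by_cases hmid : pvGood (good.set a.toNat true) v = true
        · rw [hset] at hmid
          rcases Bool.or_eq_true_iff.mp hmid with h | h
          · rw [h] at hvf; cases hvf
          · have hva : v = a := by
              have := of_decide_eq_true h
              omega
            exact c2 v (by simp [hva])
        · exact c7 v ⟨hv0, hv1⟩ (Bool.not_eq_true _ ▸ (by simpa using hmid)) hvt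
      · have hcount : (good.set a.toNat true).count false + 1 = good.count false := by
          have hfalse : good[a.toNat] = false := by
            rw [← pvGood_eq_getElem good a hat]
            exact hga
          have hmem : false ∈ good := by
            rw [← hfalse]; exact List.getElem_mem hat
          have hpos : 0 < good.count false := List.count_pos_iff.mpr hmem
          rw [List.count_set hat]
          simp [hfalse]
          omega
        have := c8
        simp only [List.length_append, List.length_singleton] at this ⊢
        omega
    · have hga' : pvGood good a = true := by
        cases hb : pvGood good a
        · exact absurd hb hga
        · rfl
      rw [if_neg hga]
      obtain ⟨c1, c2, c3, c4, c5, c6, c7, c8⟩ := ih (fun u hu => hl u (List.mem_cons_of_mem _ hu)) st good hg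
      refine ⟨c1, c2, ?_, c4, ?_, ?_, ?_, c8⟩
      · intro x hx
        rcases c3 x hx with h | h
        · exact Or.inl h
        · exact Or.inr (List.mem_cons_of_mem _ h)
      · intro u hu
        rcases List.mem_cons.mp hu with rfl | hu
        · exact c4 u hga'
        · exact c5 u hu
      · intro v hvin hv
        rcases c6 v hvin hv with h | h
        · exact Or.inl h
        · exact Or.inr (List.mem_cons_of_mem _ h)
      · intro v hvin hvf hvt
        exact c7 v hvin hvf hvt

lemma pv_reach_inb (arr : List Int) (v w : Int) (hv : pvInb arr.length v)
    (h : Relation.ReflTransGen (pvE arr) v w) : pvInb arr.length w := by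
  induction h with
  | refl => exact hv
  | tail _ h2 _ => exact h2.1

lemma pv_wlLoop_iff (arr : List Int) :
    ∀ (fuel : Nat) (stack : List Int) (good : List Bool),
    good.length = arr.length →
    (∀ v ∈ stack, pvInb arr.length v) →
    (∀ v ∈ stack, pvGood good v = true) →
    (∀ v : Int, pvInb arr.length v → pvGood good v = true → pvRZ arr v) →
    (∀ v : Int, pvInb arr.length v → pvGood good v = true →
        v ∈ stack ∨ ∀ u : Int, 0 ≤ u → u < (arr.length : Int) → pvE arr u v → pvGood good u = true) →
    (∀ v : Int, pvInb arr.length v → pvItem arr v = 0 → pvGood good v = true) →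
    stack.length + 2 * good.count false < fuel →
    ∀ v : Int, pvInb arr.length v →
      (pvGood (pvWlLoop (pvBuildPreds arr) fuel stack good) v = true ↔ pvRZ arr v) := by
  intro fuel
  induction fuel with
  | zero => intro stack good _ _ _ _ _ _ hm; omega
  | succ fuel ih =>
    intro stack good hg hsinb hsgood hsound hfront hzero hm v hv
    cases hlast : stack.getLast? with
    | none =>
      have hstack : stack = [] := by
        cases stack with
        | nil => rfl
        | cons a t => simp at hlast
      simp only [pvWlLoop, hlast]
      constructor
      · exact hsound v hv
      · rintro ⟨w, hr, hw⟩
        have hwinb : pvInb arr.length w := pv_reach_inb arr v w hv hr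
        have hgw : pvGood good w = true := hzero w hwinb hw
        have key : ∀ x, Relation.ReflTransGen (pvE arr) x w → pvInb arr.length x → pvGood good x = true := by
          intro x hx
          induction hx using Relation.ReflTransGen.head_induction_on with
          | refl => intro _; exact hgw
          | head h' hsub ih2 =>
            intro hxinb
            rename_i x' c
            have hcinb : pvInb arr.length c := h'.1
            have hgc := ih2 hcinb
            rcases hfront c hcinb hgc with hc | hcl
            · rw [hstack] at hc; cases hc
            · exact hcl x' hxinb.1 hxinb.2 h'
        exact key v hr hv
    | some v0 =>
      have hstack : stack.dropLast ++ [v0] = stack := List.dropLast_append_getLast? v0 hlast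
      have hv0mem : v0 ∈ stack := by rw [← hstack]; simp
      have hv0inb := hsinb v0 hv0mem
      have hv0good := hsgood v0 hv0mem
      have hv0nat : (v0.toNat : Int) = v0 := Int.toNat_of_nonneg hv0inb.1
      have hwnat : v0.toNat < arr.length := by obtain ⟨a, b⟩ := hv0inb; omega
      have hlmem : ∀ u : Int, u ∈ (pvBuildPreds arr).getD v0.toNat [] ↔
          0 ≤ u ∧ u < (arr.length : Int) ∧ pvE arr u v0 := by
        intro u
        have := pv_mem_preds arr v0.toNat hwnat u
        rw [hv0nat] at this
        exact this
      have hl_dom : ∀ u ∈ (pvBuildPreds arr).getD v0.toNat [], 0 ≤ u ∧ u < (arr.length : Int) :=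
        fun u hu => ⟨((hlmem u).mp hu).1, ((hlmem u).mp hu).2.1⟩
      obtain ⟨c1, c2, c3, c4, c5, c6, c7, c8⟩ :=
        pv_innerFold arr ((pvBuildPreds arr).getD v0.toNat []) hl_dom stack.dropLast good hg
      have hdropsub : ∀ x ∈ stack.dropLast, x ∈ stack := fun x hx => (List.dropLast_sublist stack).subset hx
      have hRZv0 : pvRZ arr v0 := hsound v0 hv0inb hv0good
      simp only [pvWlLoop, hlast]
      apply ih _ _ c1
      · intro x hx
        rcases c3 x hx with h | h
        · exact hsinb x (hdropsub x h)
        · obtain ⟨h0, h1⟩ := hl_dom x h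
          exact ⟨h0, h1⟩
      · intro x hx
        rcases c3 x hx with h | h
        · exact c4 x (hsgood x (hdropsub x h))
        · exact c5 x h
      · intro x hxinb hxg
        rcases c6 x hxinb hxg with h | h
        · exact hsound x hxinb h
        · obtain ⟨w, hrw, hzw⟩ := hRZv0
          exact ⟨w, Relation.ReflTransGen.head ((hlmem x).mp h).2.2 hrw, hzw⟩
      · intro x hxinb hxg
        by_cases hgx : pvGood good x = true
        · rcases hfront x hxinb hgx with hmem | hcl
          · rw [← hstack] at hmem
            rcases List.mem_append.mp hmem with hmem | hmem
            · exact Or.inl (c2 x hmem)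
            · have hx0 : x = v0 := by simpa using hmem
              right
              intro u hu0 hu1 hE
              exact c5 u ((hlmem u).mpr ⟨hu0, hu1, hx0 ▸ hE⟩)
          · right
            intro u hu0 hu1 hE
            exact c4 u (hcl u hu0 hu1 hE)
        · left
          exact c7 x hxinb (by cases hb : pvGood good x; rfl; exact absurd hb hgx) hxg
      · intro x hxinb hxz
        exact c4 x (hzero x hxinb hxz)
      · have hlen : stack.length = stack.dropLast.length + 1 := by
          conv_lhs => rw [← hstack]
          simp
        omega
      · exact hv

lemma pv_RZ_head (arr : List Int) (start : Int) (h0 : ¬ pvItem arr start = 0) :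
    pvRZ arr start ↔
      ((pvInb arr.length (start + pvItem arr start) ∧ pvRZ arr (start + pvItem arr start)) ∨
       (pvInb arr.length (start - pvItem arr start) ∧ pvRZ arr (start - pvItem arr start))) := by
  constructor
  · rintro ⟨w, hr, hw⟩
    rcases Relation.ReflTransGen.cases_head hr with rfl | ⟨c, hE, hr'⟩
    · exact absurd hw h0
    · rcases hE.2 with h | h
      · left; rw [h] at hE hr'; exact ⟨hE.1, ⟨w, hr', hw⟩⟩
      · right; rw [h] at hE hr'; exact ⟨hE.1, ⟨w, hr', hw⟩⟩
  · rintro (⟨hinb, ⟨w, hr, hw⟩⟩ | ⟨hinb, ⟨w, hr, hw⟩⟩)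
    · exact ⟨w, Relation.ReflTransGen.head ⟨hinb, Or.inl rfl⟩ hr, hw⟩
    · exact ⟨w, Relation.ReflTransGen.head ⟨hinb, Or.inr rfl⟩ hr, hw⟩

lemma pv_alt_iff (arr : List Int) (start : Int) :
    (canReachBFS_alt arr start = true ↔ pvRZ arr start) := by
  unfold canReachBFS_alt
  by_cases h0 : pvItem arr start = 0
  · rw [if_pos h0]
    simp only [true_iff]
    exact ⟨start, Relation.ReflTransGen.refl, h0⟩
  · rw [if_neg h0]
    simp only []
    have hstack0 : ∀ v : Int, v ∈ ((List.range arr.length).filter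
        (fun (i : Nat) => decide (pvItem arr (i : Int) = 0))).map Int.ofNat ↔
        ∃ i : Nat, i < arr.length ∧ pvItem arr (i : Int) = 0 ∧ v = (i : Int) := by
      intro v
      simp only [List.mem_map, List.mem_filter, List.mem_range]
      constructor
      · rintro ⟨i, ⟨hi, hz⟩, rfl⟩
        exact ⟨i, hi, by simpa using hz, rfl⟩
      · rintro ⟨i, hi, hz, rfl⟩
        exact ⟨i, ⟨hi, by simpa using hz⟩, rfl⟩
    have hW := pv_wlLoop_iff arr (3 * arr.length + 1)
      (((List.range arr.length).filter
        (fun (i : Nat) => decide (pvItem arr (i : Int) = 0))).map Int.ofNat)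
      (arr.map (fun x => decide (x = 0)))
      (by simp)
      (by
        intro v hv
        rcases (hstack0 v).mp hv with ⟨i, hi, _, rfl⟩
        exact ⟨by omega, by omega⟩)
      (by
        intro v hv
        rcases (hstack0 v).mp hv with ⟨i, hi, hz, rfl⟩
        rw [pvGood_good0 arr _ (by omega) (by omega)]
        simpa using hz)
      (by
        intro v hvin hvg
        rw [pvGood_good0 arr _ hvin.1 hvin.2] at hvg
        exact ⟨v, Relation.ReflTransGen.refl, by simpa using hvg⟩)
      (by
        intro v hvin hvg
        obtain ⟨hv0, hv1⟩ := hvin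
        rw [pvGood_good0 arr _ hv0 hv1] at hvg
        left
        rw [hstack0]
        exact ⟨v.toNat, by omega, by rw [Int.toNat_of_nonneg hv0]; simpa using hvg,
          (Int.toNat_of_nonneg hv0).symm⟩)
      (by
        intro v hvin hz
        rw [pvGood_good0 arr _ hvin.1 hvin.2]
        simpa using hz)
      (by
        have hle1 : (((List.range arr.length).filter
            (fun (i : Nat) => decide (pvItem arr (i : Int) = 0))).map Int.ofNat).length ≤ arr.length := by
          rw [List.length_map]
          calc ((List.range arr.length).filter _).length ≤ (List.range arr.length).length :=
                List.length_filter_le _ _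
            _ = arr.length := List.length_range ..
        have hle2 : (arr.map (fun x => decide (x = 0))).count false ≤ arr.length := by
          calc (arr.map (fun x => decide (x = 0))).count false
              ≤ (arr.map (fun x => decide (x = 0))).length := List.count_le_length ..
            _ = arr.length := by simp
        omega)
    rw [pv_RZ_head arr start h0]
    rw [Bool.or_eq_true, Bool.and_eq_true, Bool.and_eq_true, Bool.and_eq_true, Bool.and_eq_true]
    rw [decide_eq_true_iff, decide_eq_true_iff, decide_eq_true_iff, decide_eq_true_iff]
    constructor
    · rintro (⟨⟨ha, hb⟩, hc⟩ | ⟨⟨ha, hb⟩, hc⟩)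
      · exact Or.inl ⟨⟨ha, hb⟩, (hW _ ⟨ha, hb⟩).mp hc⟩
      · exact Or.inr ⟨⟨ha, hb⟩, (hW _ ⟨ha, hb⟩).mp hc⟩
    · rintro (⟨⟨ha, hb⟩, hc⟩ | ⟨⟨ha, hb⟩, hc⟩)
      · exact Or.inl ⟨⟨ha, hb⟩, (hW _ ⟨ha, hb⟩).mpr hc⟩
      · exact Or.inr ⟨⟨ha, hb⟩, (hW _ ⟨ha, hb⟩).mpr hc⟩

-- ===== VERDICT (by name: the statement is the Claim_ definition above) =====
theorem canReachBFS_spec : Claim_equal_canReachBFS := by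
  intro arr start _hdom _hpre
  unfold Spec_canReachBFS
  rw [Bool.eq_iff_iff, pv_A_iff, pv_alt_iff]
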